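-- pv_equiv track=rewrite | github.com/bnganyi/kentender_v1 | kentender_procurement/kentender_procurement/std_engine/services/readiness_service.py | _derive_run_status
-- ===== SOURCE A (Python) =====
-- def _severity_rank(sev: str) -> int:
-- 	return {"Critical": 4, "High": 3, "Warning": 2, "Info": 1}.get(sev, 0)
--
-- def _derive_run_status(findings: list[tuple[str, str, str]]) -> str:
-- 	if not findings:
-- 		return "Ready"
-- 	ranks = [_severity_rank(s) for _, s, _ in findings]
-- 	if max(ranks) >= 4:
-- 		return "Blocked"
-- 	if max(ranks) >= 3:
-- 		return "Blocked"
-- 	if max(ranks) >= 2: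
-- 		return "Warning"
-- 	return "Incomplete"
-- ===== SOURCE B (Python) =====
-- def _derive_run_status(findings: list[tuple[str, str, str]]) -> str:
-- 	if not findings:
-- 		return "Ready"
-- 	saw_warning = False
-- 	for _, sev, _ in findings:
-- 		if sev == "Critical" or sev == "High":
-- 			return "Blocked"
-- 		if sev == "Warning":
-- 			saw_warning = True
-- 	return "Warning" if saw_warning else "Incomplete"
-- ===== Notes on version B (the rewrite author's own statement) =====
-- stated objective: simpler
-- what changed: Single early-exit scan with a boolean accumulator: returns 'Blocked' at the first Critical/High finding and only tracks whether a Warning was seen, instead of building a full numeric rank list and taking its max against thresholds.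
import Mathlib
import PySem

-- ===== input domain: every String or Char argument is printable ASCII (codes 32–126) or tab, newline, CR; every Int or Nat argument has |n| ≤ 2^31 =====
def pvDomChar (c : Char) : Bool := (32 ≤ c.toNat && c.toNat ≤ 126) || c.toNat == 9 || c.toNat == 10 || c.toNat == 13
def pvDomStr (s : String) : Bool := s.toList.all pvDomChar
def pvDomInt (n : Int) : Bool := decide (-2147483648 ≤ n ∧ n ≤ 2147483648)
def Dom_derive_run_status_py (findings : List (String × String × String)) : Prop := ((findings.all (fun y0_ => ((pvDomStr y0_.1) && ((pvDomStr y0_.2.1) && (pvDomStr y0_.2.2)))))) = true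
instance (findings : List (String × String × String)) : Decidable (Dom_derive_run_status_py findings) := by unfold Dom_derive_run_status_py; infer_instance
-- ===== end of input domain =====

-- B is a single early-exit scan with a saw_warning flag, replacing A's rank list + max + threshold branches (simpler; same O(n) cost).

-- ===== PORT A =====
-- {"Critical": 4, "High": 3, "Warning": 2, "Info": 1}.get(sev, 0)
def severityRank (sev : String) : Int :=
  (PySem.Dict.ofList [("Critical", (4 : Int)), ("High", 3), ("Warning", 2), ("Info", 1)]).getD sev 0

def derive_run_status_py (findings : List (String × String × String)) : String :=
  if findings = [] then "Ready"
  else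
    let ranks := findings.map (fun f => severityRank f.2.1)
    match PySem.List.max? ranks (fun x => x) with
    | none => "Ready"  -- unreachable: ranks is nonempty here (Python's max never sees an empty list)
    | some m =>
      if m ≥ 4 then "Blocked"
      else if m ≥ 3 then "Blocked"
      else if m ≥ 2 then "Warning"
      else "Incomplete"

-- ===== PORT B =====
-- the for-loop of Source B: early return "Blocked", otherwise carry saw_warning
def altScan : List (String × String × String) → Bool → String
  | [], saw => if saw then "Warning" else "Incomplete"
  | f :: t, saw =>
    if f.2.1 = "Critical" ∨ f.2.1 = "High" then "Blocked"
    else altScan t (saw || f.2.1 = "Warning")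

def derive_run_status_py_alt (findings : List (String × String × String)) : String :=
  if findings = [] then "Ready"
  else altScan findings false

-- ===== PRECONDITION & SPEC =====
def Spec_derive_run_status_py (findings : List (String × String × String)) (out : String) : Prop := out = derive_run_status_py_alt findings
instance (findings : List (String × String × String)) (out : String) : Decidable (Spec_derive_run_status_py findings out) := by unfold Spec_derive_run_status_py; infer_instance

-- ===== CLAIM (what is proved, stated in full; the proofs are below) =====
def Claim_equal_derive_run_status_py : Prop := ∀ (findings : List (String × String × String)), Dom_derive_run_status_py findings → Spec_derive_run_status_py findings (derive_run_status_py findings)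

-- ===== LEMMAS AND PROOFS =====

theorem severityRank_eq (s : String) : severityRank s =
    if s = "Critical" then 4 else if s = "High" then 3 else if s = "Warning" then 2 else if s = "Info" then 1 else 0 := by
  have h : PySem.Dict.ofList [("Critical", (4 : Int)), ("High", 3), ("Warning", 2), ("Info", 1)]
      = PySem.Dict.mk [("Critical", 4), ("High", 3), ("Warning", 2), ("Info", 1)] := by decide
  simp only [severityRank, h, PySem.Dict.getD, PySem.Dict.get?_mk_cons]
  split_ifs <;> simp_all [beq_iff_eq] <;> simp [PySem.Dict.get?]

theorem rank_ge_three (s : String) : 3 ≤ severityRank s ↔ s = "Critical" ∨ s = "High" := by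
  rw [severityRank_eq]; split_ifs <;> simp_all

theorem rank_ge_two (s : String) : 2 ≤ severityRank s ↔ s = "Critical" ∨ s = "High" ∨ s = "Warning" := by
  rw [severityRank_eq]; split_ifs <;> simp_all

theorem foldl_max_ge_iff (xs : List Int) (a k : Int) :
    k ≤ xs.foldl max a ↔ k ≤ a ∨ ∃ x ∈ xs, k ≤ x := by
  induction xs generalizing a with
  | nil => simp
  | cons x t ih =>
    simp only [List.foldl_cons, ih, le_max_iff, List.mem_cons]
    aesop

theorem max_rank_three (a : String) (l : List String) :
    3 ≤ (l.map severityRank).foldl max (severityRank a) ↔ "Critical" ∈ a :: l ∨ "High" ∈ a :: l := by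
  rw [foldl_max_ge_iff]
  simp only [List.mem_map, exists_exists_and_eq_and, rank_ge_three, List.mem_cons]
  aesop

theorem max_rank_two (a : String) (l : List String) :
    2 ≤ (l.map severityRank).foldl max (severityRank a) ↔
      ("Critical" ∈ a :: l ∨ "High" ∈ a :: l) ∨ "Warning" ∈ a :: l := by
  rw [foldl_max_ge_iff]
  simp only [List.mem_map, exists_exists_and_eq_and, rank_ge_two, List.mem_cons]
  aesop

-- characterisation of B's loop
theorem altScan_eq (l : List (String × String × String)) (saw : Bool) :
    altScan l saw =
      if "Critical" ∈ l.map (fun g => g.2.1) ∨ "High" ∈ l.map (fun g => g.2.1) then "Blocked"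
      else if saw = true ∨ "Warning" ∈ l.map (fun g => g.2.1) then "Warning"
      else "Incomplete" := by
  induction l generalizing saw with
  | nil => simp [altScan]
  | cons f t ih =>
    simp only [altScan, List.map_cons, List.mem_cons, ih, Bool.or_eq_true, decide_eq_true_eq,
      @eq_comm String "Critical", @eq_comm String "High", @eq_comm String "Warning"]
    split_ifs <;> first | rfl | tauto

-- ===== VERDICT (by name: the statement is the Claim_ definition above) =====
theorem derive_run_status_py_spec : Claim_equal_derive_run_status_py := by
  intro findings _
  show derive_run_status_py findings = derive_run_status_py_alt findings
  cases findings with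
  | nil => rfl
  | cons f t =>
    have hmap : (f :: t).map (fun g : String × String × String => severityRank g.2.1)
        = severityRank f.2.1 :: (t.map (fun g => g.2.1)).map severityRank := by
      simp [List.map_map]
    simp only [derive_run_status_py, derive_run_status_py_alt, reduceCtorEq, if_false, hmap,
      PySem.List.max?_id_cons, altScan_eq]
    set M := ((t.map (fun g => g.2.1)).map severityRank).foldl max (severityRank f.2.1) with hM
    have h3 := max_rank_three f.2.1 (t.map (fun g => g.2.1))
    have h2 := max_rank_two f.2.1 (t.map (fun g => g.2.1))
    rw [← hM] at h3 h2
    have hA : (if M ≥ 4 then "Blocked" else if M ≥ 3 then "Blocked" else if M ≥ 2 then "Warning" else "Incomplete")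
        = (if 3 ≤ M then "Blocked" else if 2 ≤ M then "Warning" else "Incomplete") := by
      split_ifs <;> first | rfl | omega
    rw [hA]
    simp only [List.map_cons, List.mem_cons] at *
    split_ifs <;> simp_all <;> tauto
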